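-- pv_equiv track=rewrite | github.com/Kungawo12/Data_Structure_algorithms | Arrays/list.py | heights_viewing
-- ===== SOURCE A (Python) =====
-- def heights_viewing(list):
--     view_building = []
--     tallest = 0
--     for building in list:
--         if building > 0 and building > tallest:
--             view_building.append(building)
--             tallest = building
--     return view_building
-- ===== SOURCE B (Python) =====
-- def heights_viewing(list):
--     result = []
--     prefix = []
--     for h in list:
--         if h > max([0] + prefix):
--             result.append(h)
--         prefix = prefix + [h]
--     return result
-- ===== Notes on version B (the rewrite author's own statement) =====
-- stated objective: alternative
-- what changed: B keeps the full list of preceding buildings and re-computes the zero-floored maximum of that whole prefix for each element (quadratic rescan), instead of maintaining A's running tallest-so-far integer; A's separate positivity test disappears, subsumed by flooring the prefix maximum at zero.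
import Mathlib
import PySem

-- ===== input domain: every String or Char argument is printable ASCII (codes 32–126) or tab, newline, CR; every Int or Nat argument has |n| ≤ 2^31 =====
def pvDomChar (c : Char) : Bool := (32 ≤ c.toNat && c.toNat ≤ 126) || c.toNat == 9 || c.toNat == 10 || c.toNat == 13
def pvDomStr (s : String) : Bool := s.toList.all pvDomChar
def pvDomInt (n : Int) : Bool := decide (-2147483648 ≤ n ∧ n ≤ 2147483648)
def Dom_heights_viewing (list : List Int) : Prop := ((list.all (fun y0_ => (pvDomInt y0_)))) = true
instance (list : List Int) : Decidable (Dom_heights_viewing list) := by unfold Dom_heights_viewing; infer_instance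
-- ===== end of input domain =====

-- B rescans the whole kept prefix with max([0]+prefix) per element instead of A's running tallest integer (alternative decomposition, not faster).


-- ===== PORT A =====
-- state: (view_building, tallest)
def heights_viewing (list : List Int) : List Int :=
  (list.foldl (fun (s : List Int × Int) building =>
      if building > 0 ∧ building > s.2 then (s.1 ++ [building], building) else s)
    ([], 0)).1

-- ===== PORT B =====
-- state: (result, prefix); s.2.foldl max 0 computes max([0] + prefix)
def heights_viewing_alt (list : List Int) : List Int :=
  (list.foldl (fun (s : List Int × List Int) h =>
      (s.1 ++ (if h > s.2.foldl max 0 then [h] else []), s.2 ++ [h]))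
    ([], [])).1

-- ===== PRECONDITION & SPEC =====
def Spec_heights_viewing (list : List Int) (out : List Int) : Prop := out = heights_viewing_alt list
instance (list : List Int) (out : List Int) : Decidable (Spec_heights_viewing list out) := by unfold Spec_heights_viewing; infer_instance

-- ===== CLAIM (what is proved, stated in full; the proofs are below) =====
def Claim_equal_heights_viewing : Prop := ∀ (list : List Int), Dom_heights_viewing list → Spec_heights_viewing list (heights_viewing list)

-- ===== LEMMAS AND PROOFS =====

-- The two folds agree whenever A's tallest equals max([0] + B's prefix).
theorem hv_fold_agree (l : List Int) : ∀ (acc pre : List Int) (t : Int), t = pre.foldl max 0 →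
    (l.foldl (fun (s : List Int × Int) building =>
        if building > 0 ∧ building > s.2 then (s.1 ++ [building], building) else s) (acc, t)).1
    = (l.foldl (fun (s : List Int × List Int) h =>
        (s.1 ++ (if h > s.2.foldl max 0 then [h] else []), s.2 ++ [h])) (acc, pre)).1 := by
  induction l with
  | nil => intro acc pre t ht; simp
  | cons h l ih =>
    intro acc pre t ht
    have hnn : (0 : Int) ≤ t := ht ▸ (PySem.List.le_foldl_max pre 0).1
    have hpre : (pre ++ [h]).foldl max 0 = max t h := by
      rw [List.foldl_append, ht]; simp
    by_cases hc : h > t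
    · simp only [List.foldl_cons]
      rw [if_pos ⟨lt_of_le_of_lt hnn hc, hc⟩, if_pos (ht ▸ hc)]
      exact ih (acc ++ [h]) (pre ++ [h]) h (by rw [hpre]; omega)
    · simp only [List.foldl_cons]
      rw [if_neg (fun hx => hc hx.2), if_neg (by rw [← ht]; omega)]
      simp only [List.append_nil]
      exact ih acc (pre ++ [h]) t (by rw [hpre]; omega)

-- ===== VERDICT (by name: the statement is the Claim_ definition above) =====
theorem heights_viewing_spec : Claim_equal_heights_viewing := by
  intro l _
  unfold Spec_heights_viewing heights_viewing heights_viewing_alt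
  exact hv_fold_agree l [] [] 0 rfl
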